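-- pv_equiv track=rewrite | github.com/chaitu1385/RossmannKaggle | forecasting-product/src/presentation/templates.py | recommendation_slide
-- ===== SOURCE A (Python) =====
-- from typing import Any, Dict, List, Optional, Sequence
--
-- def recommendation_slide(
--     headline: str,
--     recommendations: Sequence[Dict[str, str]],
-- ) -> str:
--     """Recommendation slide with numbered action items.
--
--     Recommendations are sorted High → Medium → Low automatically.
--
--     Args:
--         headline: Slide headline.
--         recommendations: List of dicts with:
--             - ``action``: what to do
--             - ``rationale``: why
--             - ``confidence``: "high" | "medium" | "low"
--     """
--     # Sort: high first, then medium, then low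
--     priority = {"high": 0, "medium": 1, "low": 2}
--     sorted_recs = sorted(
--         recommendations,
--         key=lambda r: priority.get(r.get("confidence", "medium"), 1),
--     )
--
--     parts = [
--         "<!-- _class: recommendation -->\n",
--         f"\n## {headline}\n",
--     ]
--
--     for i, rec in enumerate(sorted_recs, 1):
--         conf = rec.get("confidence", "medium")
--         parts.append(f'<div class="rec-row">')
--         parts.append(f'  <div class="rec-number">{i}</div>')
--         parts.append(f'  <div class="rec-action">{rec["action"]}</div>')
--         if "rationale" in rec:
--             parts.append(f'  <div class="rec-rationale">{rec["rationale"]}</div>')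
--         parts.append(f'  <div class="badge {conf}">{conf.upper()}</div>')
--         parts.append("</div>\n")
--
--     return "\n".join(parts)
-- ===== SOURCE B (Python) =====
-- from typing import Dict, List, Sequence
--
-- def _rec_lines(i: int, rec: Dict[str, str]) -> List[str]:
--     """The HTML lines for one recommendation row."""
--     conf = rec.get("confidence", "medium")
--     return (
--         [
--             '<div class="rec-row">',
--             f'  <div class="rec-number">{i}</div>',
--             f'  <div class="rec-action">{rec["action"]}</div>',
--         ]
--         + ([f'  <div class="rec-rationale">{rec["rationale"]}</div>'] if "rationale" in rec else [])
--         + [f'  <div class="badge {conf}">{conf.upper()}</div>', "</div>\n"]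
--     )
--
-- def recommendation_slide(
--     headline: str,
--     recommendations: Sequence[Dict[str, str]],
-- ) -> str:
--     # One-pass three-way bucket partition instead of sorting: stable by construction.
--     high: List[Dict[str, str]] = []
--     medium: List[Dict[str, str]] = []
--     low: List[Dict[str, str]] = []
--     for rec in recommendations:
--         conf = rec.get("confidence", "medium")
--         if conf == "high":
--             high.append(rec)
--         elif conf == "low":
--             low.append(rec)
--         else:
--             medium.append(rec)
--     ordered = high + medium + low
--     parts = [
--         "<!-- _class: recommendation -->\n",
--         f"\n## {headline}\n",
--     ] + [line for i, rec in enumerate(ordered, 1) for line in _rec_lines(i, rec)]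
--     return "\n".join(parts)
-- ===== Notes on version B (the rewrite author's own statement) =====
-- stated objective: alternative
-- what changed: The sorted() call is replaced by a one-pass stable three-bucket partition on the confidence string (high/medium-or-unknown/low) and the HTML parts list is built by a flat comprehension over a per-recommendation helper instead of an append loop.
import Mathlib
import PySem

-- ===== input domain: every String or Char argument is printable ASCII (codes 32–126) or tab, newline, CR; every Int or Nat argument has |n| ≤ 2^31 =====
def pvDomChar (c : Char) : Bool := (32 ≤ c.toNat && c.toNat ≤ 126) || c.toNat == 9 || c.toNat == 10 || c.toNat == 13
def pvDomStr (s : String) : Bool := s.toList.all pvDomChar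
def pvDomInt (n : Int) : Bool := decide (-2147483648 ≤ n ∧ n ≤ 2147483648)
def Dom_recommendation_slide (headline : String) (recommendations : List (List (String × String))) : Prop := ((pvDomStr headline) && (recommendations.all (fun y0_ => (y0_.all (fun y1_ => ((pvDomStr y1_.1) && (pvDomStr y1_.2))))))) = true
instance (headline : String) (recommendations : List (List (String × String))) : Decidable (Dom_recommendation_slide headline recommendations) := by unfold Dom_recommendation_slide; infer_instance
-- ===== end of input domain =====

-- B replaces the sorted() call by a one-pass stable three-bucket partition (high/medium/low) and
-- builds the parts list by a flat comprehension over a per-recommendation helper instead of the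
-- append loop; the returned string is identical.

-- ===== PORT A =====
-- A's Python: sorted(recommendations, key=priority.get(confidence, 1)) then an enumerate loop
-- appending HTML lines to `parts`, joined with "\n".
def recommendation_slide (headline : String) (recommendations : List (List (String × String))) : String :=
  let priority : PySem.Dict String Int := PySem.Dict.ofList [("high", 0), ("medium", 1), ("low", 2)]
  let sorted_recs := PySem.List.sorted recommendations
    (fun r => priority.getD ((PySem.Dict.mk r).getD "confidence" "medium") 1) false
  let parts : List String :=
    ["<!-- _class: recommendation -->\n", "\n## " ++ headline ++ "\n"]
  let parts := (PySem.List.enumerate sorted_recs 1).foldl (fun parts p =>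
    let conf := (PySem.Dict.mk p.2).getD "confidence" "medium"
    parts ++
      (["<div class=\"rec-row\">",
        "  <div class=\"rec-number\">" ++ PySem.Int.toStr p.1 ++ "</div>",
        -- rec["action"]: KeyError (missing key) is excluded by Pre_, so getD's default is never used
        "  <div class=\"rec-action\">" ++ (PySem.Dict.mk p.2).getD "action" "" ++ "</div>"]
       ++ (if (PySem.Dict.mk p.2).contains "rationale" then
            ["  <div class=\"rec-rationale\">" ++ (PySem.Dict.mk p.2).getD "rationale" "" ++ "</div>"]
          else [])
       ++ ["  <div class=\"badge " ++ conf ++ "\">" ++ PySem.Str.upper conf ++ "</div>",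
           "</div>\n"])) parts
  PySem.Str.join "\n" parts

-- ===== PORT B =====
-- _rec_lines(i, rec) from Source B: the HTML lines of one recommendation row.
def pvRecLines (i : Int) (r : List (String × String)) : List String :=
  let conf := (PySem.Dict.mk r).getD "confidence" "medium"
  ["<div class=\"rec-row\">",
   "  <div class=\"rec-number\">" ++ PySem.Int.toStr i ++ "</div>",
   -- rec["action"]: KeyError (missing key) is excluded by Pre_, so getD's default is never used
   "  <div class=\"rec-action\">" ++ (PySem.Dict.mk r).getD "action" "" ++ "</div>"]
  ++ (if (PySem.Dict.mk r).contains "rationale" then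
        ["  <div class=\"rec-rationale\">" ++ (PySem.Dict.mk r).getD "rationale" "" ++ "</div>"]
      else [])
  ++ ["  <div class=\"badge " ++ conf ++ "\">" ++ PySem.Str.upper conf ++ "</div>", "</div>\n"]

def recommendation_slide_alt (headline : String) (recommendations : List (List (String × String))) : String :=
  let bs := recommendations.foldl
    (fun (bs : List (List (String × String)) × List (List (String × String)) × List (List (String × String))) r =>
      let conf := (PySem.Dict.mk r).getD "confidence" "medium"
      if conf = "high" then (bs.1 ++ [r], bs.2.1, bs.2.2)
      else if conf = "low" then (bs.1, bs.2.1, bs.2.2 ++ [r])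
      else (bs.1, bs.2.1 ++ [r], bs.2.2)) ([], [], [])
  let ordered := bs.1 ++ bs.2.1 ++ bs.2.2
  let parts : List String :=
    ["<!-- _class: recommendation -->\n", "\n## " ++ headline ++ "\n"]
    ++ (PySem.List.enumerate ordered 1).flatMap (fun p => pvRecLines p.1 p.2)
  PySem.Str.join "\n" parts

-- ===== PRECONDITION & SPEC =====
-- Pre_ excludes exactly the inputs where Python A raises KeyError: a recommendation without an
-- "action" key (rec["action"]). B raises there too.
def Pre_recommendation_slide (headline : String) (recommendations : List (List (String × String))) : Prop :=
  ∀ r ∈ recommendations, r.any (fun p => p.1 == "action") = true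
instance (headline : String) (recommendations : List (List (String × String))) : Decidable (Pre_recommendation_slide headline recommendations) := by unfold Pre_recommendation_slide; infer_instance

def pvWitness_recommendation_slide : String × (List (List (String × String))) :=
  ("Next steps",
   [[("action", "Ship it"), ("confidence", "high")],
    [("action", "Wait"), ("rationale", "too risky"), ("confidence", "low")],
    [("action", "Measure")]])

def Spec_recommendation_slide (headline : String) (recommendations : List (List (String × String))) (out : String) : Prop := out = recommendation_slide_alt headline recommendations
instance (headline : String) (recommendations : List (List (String × String))) (out : String) : Decidable (Spec_recommendation_slide headline recommendations out) := by unfold Spec_recommendation_slide; infer_instance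

-- ===== CLAIM (what is proved, stated in full; the proofs are below) =====
def Claim_equal_recommendation_slide : Prop := ∀ (headline : String) (recommendations : List (List (String × String))), Dom_recommendation_slide headline recommendations → Pre_recommendation_slide headline recommendations → Spec_recommendation_slide headline recommendations (recommendation_slide headline recommendations)

-- ===== LEMMAS AND PROOFS =====

-- the confidence string of a record (shared shape of both ports)
def pvConf (r : List (String × String)) : String := (PySem.Dict.mk r).getD "confidence" "medium"

-- A's sort key
def pvKey (r : List (String × String)) : Int :=
  (PySem.Dict.ofList [("high", (0 : Int)), ("medium", 1), ("low", 2)]).getD (pvConf r) 1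

lemma pvKey_eq (r : List (String × String)) :
    pvKey r = if pvConf r = "high" then 0 else if pvConf r = "low" then 2 else 1 := by
  have hofl : (PySem.Dict.ofList [("high", (0 : Int)), ("medium", 1), ("low", 2)])
      = PySem.Dict.mk [("high", 0), ("medium", 1), ("low", 2)] := by decide
  unfold pvKey
  rw [hofl]
  by_cases h1 : pvConf r = "high"
  · simp [h1, PySem.Dict.getD, PySem.Dict.get?_mk_cons]
  · by_cases h2 : pvConf r = "low"
    · simp [h2, PySem.Dict.getD, PySem.Dict.get?_mk_cons]
    · have b1 : ("high" == pvConf r) = false := by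
        simp [beq_eq_false_iff_ne]; exact fun h => h1 h.symm
      have b3 : ("low" == pvConf r) = false := by
        simp [beq_eq_false_iff_ne]; exact fun h => h2 h.symm
      by_cases h2' : pvConf r = "medium"
      · simp [h2', PySem.Dict.getD, PySem.Dict.get?_mk_cons]
      · have b2 : ("medium" == pvConf r) = false := by
          simp [beq_eq_false_iff_ne]; exact fun h => h2' h.symm
        simp [h1, h2, b1, b2, b3, PySem.Dict.getD, PySem.Dict.get?_mk_cons, PySem.Dict.get?]

lemma insertBy_of_forall_true {α : Type} (b : α → α → Bool) (x : α) (r : List α)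
    (h : ∀ y ∈ r, b x y = true) : PySem.List.insertBy b x r = x :: r := by
  cases r <;> simp_all [PySem.List.insertBy]

lemma insertBy_append_of_forall_false {α : Type} (b : α → α → Bool) (x : α) (l r : List α)
    (h : ∀ y ∈ l, b x y = false) :
    PySem.List.insertBy b x (l ++ r) = l ++ PySem.List.insertBy b x r := by
  induction l with
  | nil => simp
  | cons y ys ih =>
    have hy : b x y = false := h y (by simp)
    simp [PySem.List.insertBy, hy, ih (fun z hz => h z (by simp [hz]))]

-- a stable sort with a key taking only the values 0,1,2 is the three-way partition by the key
lemma sorted_ternary_aux {α : Type} (key : α → Int) (hk : ∀ x, key x = 0 ∨ key x = 1 ∨ key x = 2)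
    (xs : List α) : ∀ (f0 f1 f2 : List α),
    (∀ y ∈ f0, key y = 0) → (∀ y ∈ f1, key y = 1) → (∀ y ∈ f2, key y = 2) →
    xs.foldl (fun acc x => PySem.List.insertBy (fun a b => decide (key a < key b)) x acc)
        (f0 ++ f1 ++ f2)
      = (f0 ++ xs.filter (fun x => key x == 0)) ++ (f1 ++ xs.filter (fun x => key x == 1))
        ++ (f2 ++ xs.filter (fun x => key x == 2)) := by
  induction xs with
  | nil => intro f0 f1 f2 _ _ _; simp
  | cons x xs ih =>
    intro f0 f1 f2 h0 h1 h2
    rcases hk x with hx | hx | hx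
    · have hstep : PySem.List.insertBy (fun a b => decide (key a < key b)) x (f0 ++ f1 ++ f2)
          = (f0 ++ [x]) ++ f1 ++ f2 := by
        rw [List.append_assoc,
          insertBy_append_of_forall_false _ _ f0 _ (fun y hy => by simp [hx, h0 y hy]),
          insertBy_of_forall_true _ _ _ (fun y hy => by
            rcases List.mem_append.1 hy with hy | hy
            · simp [hx, h1 y hy]
            · simp [hx, h2 y hy])]
        simp
      simp only [List.foldl_cons, hstep,
        ih (f0 ++ [x]) f1 f2
          (fun y hy => by rcases List.mem_append.1 hy with hy | hy
                          · exact h0 y hy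
                          · simp at hy; simpa [hy] using hx) h1 h2]
      simp [List.filter_cons, hx]
    · have hstep : PySem.List.insertBy (fun a b => decide (key a < key b)) x (f0 ++ f1 ++ f2)
          = f0 ++ (f1 ++ [x]) ++ f2 := by
        rw [List.append_assoc, List.append_assoc,
          insertBy_append_of_forall_false _ _ f0 _ (fun y hy => by simp [hx, h0 y hy]),
          insertBy_append_of_forall_false _ _ f1 _ (fun y hy => by simp [hx, h1 y hy]),
          insertBy_of_forall_true _ _ _ (fun y hy => by simp [hx, h2 y hy])]
        simp
      simp only [List.foldl_cons, hstep,
        ih f0 (f1 ++ [x]) f2 h0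
          (fun y hy => by rcases List.mem_append.1 hy with hy | hy
                          · exact h1 y hy
                          · simp at hy; simpa [hy] using hx) h2]
      simp [List.filter_cons, hx]
    · have hstep : PySem.List.insertBy (fun a b => decide (key a < key b)) x (f0 ++ f1 ++ f2)
          = f0 ++ f1 ++ (f2 ++ [x]) := by
        rw [PySem.List.insertBy_of_forall_not_before _ _ _ (fun y hy => by
          rcases List.mem_append.1 hy with hy | hy
          · rcases List.mem_append.1 hy with hy | hy
            · simp [hx, h0 y hy]
            · simp [hx, h1 y hy]
          · simp [hx, h2 y hy])]
        simp
      simp only [List.foldl_cons, hstep,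
        ih f0 f1 (f2 ++ [x]) h0 h1
          (fun y hy => by rcases List.mem_append.1 hy with hy | hy
                          · exact h2 y hy
                          · simp at hy; simpa [hy] using hx)]
      simp [List.filter_cons, hx]

lemma sorted_ternary {α : Type} (xs : List α) (key : α → Int)
    (hk : ∀ x, key x = 0 ∨ key x = 1 ∨ key x = 2) :
    PySem.List.sorted xs key false
      = xs.filter (fun x => key x == 0) ++ xs.filter (fun x => key x == 1)
        ++ xs.filter (fun x => key x == 2) := by
  rw [PySem.List.sorted_eq_foldl_insertBy]
  simpa using sorted_ternary_aux key hk xs [] [] [] (by simp) (by simp) (by simp)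

-- B's bucket loop is the same three-way partition
lemma buckets_eq (xs : List (List (String × String)))
    (a b c : List (List (String × String))) :
    xs.foldl (fun bs r =>
        let conf := (PySem.Dict.mk r).getD "confidence" "medium"
        if conf = "high" then (bs.1 ++ [r], bs.2.1, bs.2.2)
        else if conf = "low" then (bs.1, bs.2.1, bs.2.2 ++ [r])
        else (bs.1, bs.2.1 ++ [r], bs.2.2)) (a, b, c)
      = (a ++ xs.filter (fun r => pvKey r == 0), b ++ xs.filter (fun r => pvKey r == 1),
         c ++ xs.filter (fun r => pvKey r == 2)) := by
  induction xs generalizing a b c with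
  | nil => simp
  | cons x xs ih =>
    have hx := pvKey_eq x
    by_cases h1 : pvConf x = "high"
    · simp only [List.foldl_cons]
      rw [if_pos (by simpa [pvConf] using h1)]
      simp [ih, List.filter_cons, hx, h1, List.append_assoc]
    · by_cases h2 : pvConf x = "low"
      · simp only [List.foldl_cons]
        rw [if_neg (by simpa [pvConf] using h1), if_pos (by simpa [pvConf] using h2)]
        simp [ih, hx, h2, List.append_assoc]
      · simp only [List.foldl_cons]
        rw [if_neg (by simpa [pvConf] using h1), if_neg (by simpa [pvConf] using h2)]
        simp [ih, hx, h1, h2, List.append_assoc]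

-- ===== VERDICT (by name: the statement is the Claim_ definition above) =====
theorem recommendation_slide_spec : Claim_equal_recommendation_slide := by
  intro headline recs _ _
  unfold Spec_recommendation_slide recommendation_slide recommendation_slide_alt
  simp only
  rw [PySem.List.foldl_append_eq_flatMap, buckets_eq]
  have hsorted : PySem.List.sorted recs
      (fun r => (PySem.Dict.ofList [("high", (0:Int)), ("medium", 1), ("low", 2)]).getD
        ((PySem.Dict.mk r).getD "confidence" "medium") 1) false
      = recs.filter (fun r => pvKey r == 0) ++ recs.filter (fun r => pvKey r == 1)
        ++ recs.filter (fun r => pvKey r == 2) := by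
    have := sorted_ternary recs pvKey (fun r => by rw [pvKey_eq r]; split_ifs <;> simp)
    simpa [pvKey, pvConf] using this
  rw [hsorted]
  rfl
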